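-- pv_equiv track=rewrite | github.com/YuJ-ZHU/JavSP | javsp/file.py | _normalize_duplicate_avid
-- ===== SOURCE A (Python) =====
-- _DUPLICATE_SUFFIXES = ('-UC', '-C')
--
-- def _normalize_duplicate_avid(value: str | None) -> str | None:
--     """Upper-case番号并移除-C/-UC后缀，便于重复匹配"""
--     if not value:
--         return None
--     avid = value.strip().upper()
--     # 循环移除所有后缀（处理重复后缀情况）
--     while True:
--         removed = False
--         for suffix in _DUPLICATE_SUFFIXES:
--             if avid.endswith(suffix):
--                 avid = avid[:-len(suffix)]
--                 removed = True
--                 break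
--         if not removed:
--             break
--     return avid
-- ===== SOURCE B (Python) =====
-- _DUPLICATE_SUFFIXES = ('-UC', '-C')
--
-- def _is_suffix_run(t):
--     """True iff t is a (possibly empty) concatenation of '-UC'/'-C' tokens."""
--     while t:
--         if t.startswith('-UC'):
--             t = t[3:]
--         elif t.startswith('-C'):
--             t = t[2:]
--         else:
--             return False
--     return True
--
-- def _normalize_duplicate_avid(value):
--     """Upper-case the id and cut at the leftmost position whose whole suffix is a run of -UC/-C tokens."""
--     if not value:
--         return None
--     avid = value.strip().upper()
--     for i in range(len(avid)):
--         if _is_suffix_run(avid[i:]):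
--             return avid[:i]
--     return avid
-- ===== Notes on version B (the rewrite author's own statement) =====
-- stated objective: alternative
-- what changed: Replaces A's repeated right-end stripping loop (peel '-UC'/'-C' off the end until neither matches) with a single left-to-right scan that cuts at the earliest position whose entire suffix is a concatenation of '-UC'/'-C' tokens (regex-style earliest match).
import Mathlib
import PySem

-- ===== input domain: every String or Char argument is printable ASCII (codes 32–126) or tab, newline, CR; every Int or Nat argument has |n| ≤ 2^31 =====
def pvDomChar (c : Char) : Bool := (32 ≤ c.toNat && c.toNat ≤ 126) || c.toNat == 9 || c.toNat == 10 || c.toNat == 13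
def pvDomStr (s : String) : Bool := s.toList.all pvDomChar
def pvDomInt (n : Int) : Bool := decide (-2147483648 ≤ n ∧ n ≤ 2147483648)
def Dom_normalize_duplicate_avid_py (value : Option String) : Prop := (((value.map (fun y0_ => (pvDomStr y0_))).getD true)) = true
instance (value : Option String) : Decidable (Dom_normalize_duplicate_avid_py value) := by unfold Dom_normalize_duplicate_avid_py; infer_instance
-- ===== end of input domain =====

-- B replaces A's repeated right-end stripping of '-UC'/'-C' with one left-to-right search for the
-- earliest position whose whole suffix is a run of those tokens; objective: alternative (same behaviour).

-- ===== PORT A =====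
-- the 'while True' loop: the inner 'for suffix in _DUPLICATE_SUFFIXES: ... break' is inlined branch by
-- branch in tuple order ('-UC' first, then '-C'); avid[:-len(suffix)] is PySem.List.slice
def pvLoopA (avid : List Char) : List Char :=
  if h1 : PySem.Chars.endswith avid ['-', 'U', 'C'] then
    pvLoopA (PySem.List.slice avid none (some (-3)))
  else if h2 : PySem.Chars.endswith avid ['-', 'C'] then
    pvLoopA (PySem.List.slice avid none (some (-2)))
  else avid
termination_by avid.length
decreasing_by
  · obtain ⟨t, rfl⟩ := (PySem.Chars.endswith_iff _ _).1 h1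
    simp [PySem.List.slice, PySem.List.clampIdx]
  · obtain ⟨t, rfl⟩ := (PySem.Chars.endswith_iff _ _).1 h2
    simp [PySem.List.slice, PySem.List.clampIdx]

def normalize_duplicate_avid_py (value : Option String) : Option String :=
  match value with
  | none => none                          -- 'if not value: return None'
  | some v =>
    if v = "" then none                   -- '' is falsy too
    else some (String.ofList (pvLoopA (PySem.Chars.upper (PySem.Chars.strip v.toList))))

-- ===== PORT B =====
-- _is_suffix_run: the 'while t:' loop with startswith tests; t[3:] / t[2:] (nonnegative slice) = List.drop

def pvIsSuffixRun (t : List Char) : Bool :=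
  if _h0 : t = [] then true
  else if PySem.Chars.startswith t ['-', 'U', 'C'] then pvIsSuffixRun (t.drop 3)
  else if PySem.Chars.startswith t ['-', 'C'] then pvIsSuffixRun (t.drop 2)
  else false
termination_by t.length
decreasing_by
  all_goals
    have hl : 0 < t.length := List.length_pos_iff.mpr (by assumption)
    simp only [List.length_drop]
    omega

-- 'for i in range(len(avid)): if _is_suffix_run(avid[i:]): return avid[:i]' and fall through to avid;
-- avid[i:] = List.drop i, avid[:i] = List.take i (nonnegative slices)
def pvScanB (s : List Char) (i : Nat) : List Char :=
  if i < s.length then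
    if pvIsSuffixRun (s.drop i) then s.take i else pvScanB s (i + 1)
  else s
termination_by s.length - i


def normalize_duplicate_avid_py_alt (value : Option String) : Option String :=
  match value with
  | none => none
  | some v =>
    if v = "" then none
    else some (String.ofList (pvScanB (PySem.Chars.upper (PySem.Chars.strip v.toList)) 0))

-- ===== PRECONDITION & SPEC =====
def Spec_normalize_duplicate_avid_py (value : Option String) (out : Option String) : Prop := out = normalize_duplicate_avid_py_alt value
instance (value : Option String) (out : Option String) : Decidable (Spec_normalize_duplicate_avid_py value out) := by unfold Spec_normalize_duplicate_avid_py; infer_instance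

-- ===== CLAIM (what is proved, stated in full; the proofs are below) =====
def Claim_equal_normalize_duplicate_avid_py : Prop := ∀ (value : Option String), Dom_normalize_duplicate_avid_py value → Spec_normalize_duplicate_avid_py value (normalize_duplicate_avid_py value)

-- ===== LEMMAS AND PROOFS =====

-- a run of '-UC'/'-C' tokens, as an inductive predicate (the language _is_suffix_run decides)
inductive PvRun : List Char → Prop
  | nil : PvRun []
  | uc (r : List Char) : PvRun r → PvRun ('-' :: 'U' :: 'C' :: r)
  | c (r : List Char) : PvRun r → PvRun ('-' :: 'C' :: r)

def PvTok (tok : List Char) : Prop := tok = ['-', 'U', 'C'] ∨ tok = ['-', 'C']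

theorem pv_run_iff (t : List Char) : pvIsSuffixRun t = true ↔ PvRun t := by
  rw [pvIsSuffixRun]
  split_ifs with h0 h1 h2
  · subst h0; simp [PvRun.nil]
  · obtain ⟨r, rfl⟩ := (PySem.Chars.startswith_iff _ _).1 h1
    simp only [List.cons_append, List.nil_append, List.drop_succ_cons, List.drop_zero]
    rw [pv_run_iff r]
    constructor
    · exact PvRun.uc r
    · intro h; cases h; assumption
  · obtain ⟨r, rfl⟩ := (PySem.Chars.startswith_iff _ _).1 h2
    simp only [List.cons_append, List.nil_append, List.drop_succ_cons, List.drop_zero]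
    rw [pv_run_iff r]
    constructor
    · exact PvRun.c r
    · intro h; cases h; assumption
  · simp only [false_iff]
    intro h
    cases h with
    | nil => exact h0 rfl
    | uc r hr => exact h1 ((PySem.Chars.startswith_iff _ _).2 ⟨r, rfl⟩)
    | c r hr => exact h2 ((PySem.Chars.startswith_iff _ _).2 ⟨r, rfl⟩)
termination_by t.length
decreasing_by all_goals (subst_vars; simp only [List.length_append, List.length_cons]; omega)

theorem pv_run_tok (tok : List Char) (htok : PvTok tok) : PvRun tok := by
  rcases htok with rfl | rfl
  · exact PvRun.uc [] PvRun.nil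
  · exact PvRun.c [] PvRun.nil

theorem pv_run_endswith (t : List Char) (h : PvRun t) (hne : t ≠ []) :
    ∃ tok, PvTok tok ∧ tok <:+ t := by
  induction h with
  | nil => exact absurd rfl hne
  | uc r hr ih =>
    by_cases hr0 : r = []
    · subst hr0; exact ⟨['-', 'U', 'C'], Or.inl rfl, List.suffix_rfl⟩
    · obtain ⟨tok, htok, hsuf⟩ := ih hr0
      exact ⟨tok, htok, hsuf.trans ((List.suffix_cons _ _).trans ((List.suffix_cons _ _).trans (List.suffix_cons _ _)))⟩
  | c r hr ih =>
    by_cases hr0 : r = []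
    · subst hr0; exact ⟨['-', 'C'], Or.inr rfl, List.suffix_rfl⟩
    · obtain ⟨tok, htok, hsuf⟩ := ih hr0
      exact ⟨tok, htok, hsuf.trans ((List.suffix_cons _ _).trans (List.suffix_cons _ _))⟩

theorem pv_run_append (tok : List Char) (htok : PvTok tok) (x : List Char) (hx : PvRun x) :
    PvRun (x ++ tok) := by
  induction hx with
  | nil => simpa using pv_run_tok tok htok
  | uc r _ ih => exact PvRun.uc (r ++ tok) ih
  | c r _ ih => exact PvRun.c (r ++ tok) ih

theorem pv_run_append_rev (tok : List Char) (htok : PvTok tok) :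
    ∀ (x : List Char), PvRun (x ++ tok) → x = [] ∨ PvRun x
  | [], _ => Or.inl rfl
  | [c1], h => by rcases htok with rfl | rfl <;> cases h
  | [c1, c2], h => by
      rcases htok with rfl | rfl <;> (cases h; exact Or.inr (PvRun.c [] PvRun.nil))
  | c1 :: c2 :: c3 :: x'', h => by
      rcases htok with rfl | rfl
      · cases h with
        | uc r hr =>
          rcases pv_run_append_rev _ (Or.inl rfl) x'' hr with rfl | hx
          · exact Or.inr (PvRun.uc [] PvRun.nil)
          · exact Or.inr (PvRun.uc x'' hx)
        | c r hr =>
          rcases pv_run_append_rev _ (Or.inl rfl) (c3 :: x'') hr with h' | hx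
          · exact absurd h' (by simp)
          · exact Or.inr (PvRun.c (c3 :: x'') hx)
      · cases h with
        | uc r hr =>
          rcases pv_run_append_rev _ (Or.inr rfl) x'' hr with rfl | hx
          · exact Or.inr (PvRun.uc [] PvRun.nil)
          · exact Or.inr (PvRun.uc x'' hx)
        | c r hr =>
          rcases pv_run_append_rev _ (Or.inr rfl) (c3 :: x'') hr with h' | hx
          · exact absurd h' (by simp)
          · exact Or.inr (PvRun.c (c3 :: x'') hx)

theorem pv_scan_stuck (s : List Char) (i : Nat)
    (h : ∀ j, i ≤ j → j < s.length → ¬ PvRun (s.drop j)) : pvScanB s i = s := by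
  rw [pvScanB]
  split_ifs with h1 h2
  · exact absurd ((pv_run_iff _).1 h2) (h i le_rfl h1)
  · exact pv_scan_stuck s (i + 1) (fun j hj hl => h j (by omega) hl)
  · rfl
termination_by s.length - i

theorem pv_scan_append (tok : List Char) (htok : PvTok tok) (x : List Char) (i : Nat)
    (hi : i ≤ x.length) : pvScanB (x ++ tok) i = pvScanB x i := by
  rcases eq_or_lt_of_le hi with heq | hlt
  · subst heq
    conv_lhs => rw [pvScanB]
    conv_rhs => rw [pvScanB]
    have h1 : x.length < (x ++ tok).length := by rcases htok with rfl | rfl <;> simp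
    rw [if_pos h1, List.drop_left, if_pos ((pv_run_iff tok).2 (pv_run_tok tok htok)),
      if_neg (lt_irrefl x.length), List.take_left]
  · conv_lhs => rw [pvScanB]
    conv_rhs => rw [pvScanB]
    have h1 : i < (x ++ tok).length := by simp only [List.length_append]; omega
    have hne : x.drop i ≠ [] := by simp only [ne_eq, List.drop_eq_nil_iff]; omega
    have hcond : pvIsSuffixRun ((x ++ tok).drop i) = pvIsSuffixRun (x.drop i) := by
      rw [List.drop_append_of_le_length hi]
      by_cases hr : PvRun (x.drop i)
      · rw [(pv_run_iff _).2 (pv_run_append tok htok _ hr), (pv_run_iff _).2 hr]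
      · have hL : pvIsSuffixRun (x.drop i ++ tok) = false := by
          rw [Bool.eq_false_iff]
          intro hc
          rcases pv_run_append_rev tok htok _ ((pv_run_iff _).1 hc) with h' | h'
          · exact hne h'
          · exact hr h'
        have hR : pvIsSuffixRun (x.drop i) = false := by
          rw [Bool.eq_false_iff]; intro hc; exact hr ((pv_run_iff _).1 hc)
        rw [hL, hR]
    rw [if_pos h1, if_pos hlt, hcond]
    by_cases hc : pvIsSuffixRun (x.drop i) = true
    · rw [if_pos hc, if_pos hc, List.take_append_of_le_length hi]
    · rw [if_neg hc, if_neg hc]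
      exact pv_scan_append tok htok x (i + 1) (by omega)
termination_by x.length - i

-- slicing the final token off the end undoes the append
theorem pv_slice_tok3 (x : List Char) :
    PySem.List.slice (x ++ ['-', 'U', 'C']) none (some (-3)) = x := by
  simp [PySem.List.slice, PySem.List.clampIdx]

theorem pv_slice_tok2 (x : List Char) :
    PySem.List.slice (x ++ ['-', 'C']) none (some (-2)) = x := by
  simp [PySem.List.slice, PySem.List.clampIdx]

theorem pv_loop_eq_scan (s : List Char) : pvLoopA s = pvScanB s 0 := by
  rw [pvLoopA]
  split_ifs with h1 h2
  · obtain ⟨x, rfl⟩ := (PySem.Chars.endswith_iff _ _).1 h1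
    rw [pv_slice_tok3 x, pv_loop_eq_scan x, pv_scan_append _ (Or.inl rfl) x 0 (by omega)]
  · obtain ⟨x, rfl⟩ := (PySem.Chars.endswith_iff _ _).1 h2
    rw [pv_slice_tok2 x, pv_loop_eq_scan x, pv_scan_append _ (Or.inr rfl) x 0 (by omega)]
  · refine (pv_scan_stuck s 0 ?_).symm
    intro j _ hj hrun
    have hne : s.drop j ≠ [] := by simp only [ne_eq, List.drop_eq_nil_iff]; omega
    obtain ⟨tok, htok, hsuf⟩ := pv_run_endswith _ hrun hne
    have hs : tok <:+ s := hsuf.trans (List.drop_suffix j s)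
    rcases htok with rfl | rfl
    · exact h1 ((PySem.Chars.endswith_iff _ _).2 hs)
    · exact h2 ((PySem.Chars.endswith_iff _ _).2 hs)
termination_by s.length
decreasing_by all_goals (subst_vars; simp only [List.length_append, List.length_cons]; omega)

-- ===== VERDICT (by name: the statement is the Claim_ definition above) =====
theorem normalize_duplicate_avid_py_spec : Claim_equal_normalize_duplicate_avid_py := by
  intro value _
  unfold Spec_normalize_duplicate_avid_py normalize_duplicate_avid_py normalize_duplicate_avid_py_alt
  cases value with
  | none => rfl
  | some v =>
    by_cases hv : v = ""
    · simp [hv]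
    · simp [hv, pv_loop_eq_scan]
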